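-- pv_equiv track=rewrite | github.com/dw-Apples-And-Bananas/gesture-map | src/gesture.py | get
-- ===== SOURCE A (Python) =====
-- def get(points):
--     start = points[0]
--     end = points[-1]
--     diffx = start[0] - end[0]
--     diffy = start[1] - end[1]
--     # list temp, check for collisions
--     results = []
--     gestures = {
--         "up": diffy > 100 and inxy(points, 50, 0),
--         "down": diffy < -100 and inxy(points, 50, 0),
--         "left": diffx > 100 and inxy(points, 50, 1),
--         "right": diffx < -100 and inxy(points, 50, 1),
--     }
--     for gesture in gestures:
--         if gestures[gesture]:
--             results.append(gesture)
--     return results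
--
-- def inxy(points, _range, xy):
--     start = points[0]
--     for point in points:
--         diff = start[xy] - point[xy]
--         if diff < -_range or diff > _range:
--             return False
--     return True
-- ===== SOURCE B (Python) =====
-- def get(points):
--     sx, sy = points[0]
--     ex, ey = points[-1]
--     minx = maxx = sx
--     miny = maxy = sy
--     for x, y in points:
--         if x < minx: minx = x
--         if x > maxx: maxx = x
--         if y < miny: miny = y
--         if y > maxy: maxy = y
--     stable_x = maxx - sx <= 50 and sx - minx <= 50
--     stable_y = maxy - sy <= 50 and sy - miny <= 50
--     dx = sx - ex
--     dy = sy - ey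
--     out = []
--     if dy > 100 and stable_x: out.append("up")
--     if dy < -100 and stable_x: out.append("down")
--     if dx > 100 and stable_y: out.append("left")
--     if dx < -100 and stable_y: out.append("right")
--     return out
-- ===== Notes on version B (the rewrite author's own statement) =====
-- stated objective: alternative
-- what changed: Replaces the dict of lazily-evaluated flags with two calls each to the rescanning helper inxy by a single accumulator pass computing minx/maxx/miny/maxy extents, then classifies with closed-form extent checks.
import Mathlib
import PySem

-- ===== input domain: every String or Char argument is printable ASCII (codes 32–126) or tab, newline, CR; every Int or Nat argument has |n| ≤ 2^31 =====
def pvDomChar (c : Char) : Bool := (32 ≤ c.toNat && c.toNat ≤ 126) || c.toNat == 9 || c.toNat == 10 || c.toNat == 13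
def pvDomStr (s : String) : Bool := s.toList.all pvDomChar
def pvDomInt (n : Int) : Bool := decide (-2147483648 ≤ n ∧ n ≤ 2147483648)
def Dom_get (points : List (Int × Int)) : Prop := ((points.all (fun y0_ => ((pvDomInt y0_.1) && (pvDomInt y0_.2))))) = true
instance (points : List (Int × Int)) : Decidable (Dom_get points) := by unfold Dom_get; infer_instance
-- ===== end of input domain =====

-- B replaces the per-axis inxy rescans with one min/max extent pass and closed-form extent checks (objective: alternative).

-- ===== PORT A =====
-- start[xy]: tuple indexing by 0/1
def pairGet (p : Int × Int) (xy : Nat) : Int := if xy = 0 then p.1 else p.2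

-- literal port of inxy: early-return-False loop = all points pass the range test
def inxy (points : List (Int × Int)) (range_ : Int) (xy : Nat) : Bool :=
  match PySem.List.pyGet? points 0 with
  | none => true  -- unreachable under Pre_get (Python raises IndexError on [])
  | some start =>
      points.all (fun point =>
        !(decide (pairGet start xy - pairGet point xy < -range_) ||
          decide (pairGet start xy - pairGet point xy > range_)))

def get (points : List (Int × Int)) : List String :=
  match PySem.List.pyGet? points 0, PySem.List.pyGet? points (-1) with
  | some start, some «end» =>
      let diffx := start.1 - «end».1
      let diffy := start.2 - «end».2
      -- dict literal in insertion order, then the for-loop over its keys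
      let gestures : List (String × Bool) :=
        [("up", decide (diffy > 100) && inxy points 50 0),
         ("down", decide (diffy < -100) && inxy points 50 0),
         ("left", decide (diffx > 100) && inxy points 50 1),
         ("right", decide (diffx < -100) && inxy points 50 1)]
      gestures.foldl (fun results g => if g.2 then results ++ [g.1] else results) []
  | _, _ => []  -- unreachable under Pre_get (Python raises IndexError on [])

-- ===== PORT B =====
def get_alt (points : List (Int × Int)) : List String :=
  match points with
  | [] => []  -- unreachable under Pre_get
  | (sx, sy) :: _ =>
      match PySem.List.pyGet? points (-1) with
      | none => []  -- unreachable
      | some (ex, ey) =>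
          let st := points.foldl
            (fun (acc : Int × Int × Int × Int) (p : Int × Int) =>
              ( if p.1 < acc.1 then p.1 else acc.1,
                if p.1 > acc.2.1 then p.1 else acc.2.1,
                if p.2 < acc.2.2.1 then p.2 else acc.2.2.1,
                if p.2 > acc.2.2.2 then p.2 else acc.2.2.2 ))
            (sx, sx, sy, sy)
          let stableX := decide (st.2.1 - sx ≤ 50) && decide (sx - st.1 ≤ 50)
          let stableY := decide (st.2.2.2 - sy ≤ 50) && decide (sy - st.2.2.1 ≤ 50)
          let dx := sx - ex
          let dy := sy - ey
          let out : List String := []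
          let out := if decide (dy > 100) && stableX then out ++ ["up"] else out
          let out := if decide (dy < -100) && stableX then out ++ ["down"] else out
          let out := if decide (dx > 100) && stableY then out ++ ["left"] else out
          let out := if decide (dx < -100) && stableY then out ++ ["right"] else out
          out

-- ===== PRECONDITION & SPEC =====
-- Python A raises IndexError on the empty list (points[0]); only that input is excluded.
def Pre_get (points : List (Int × Int)) : Prop := points ≠ []
instance (points : List (Int × Int)) : Decidable (Pre_get points) := by unfold Pre_get; infer_instance
def pvWitness_get : (List (Int × Int)) := [(0, 0), (10, 200)]

def Spec_get (points : List (Int × Int)) (out : List String) : Prop := out = get_alt points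
instance (points : List (Int × Int)) (out : List String) : Decidable (Spec_get points out) := by unfold Spec_get; infer_instance

-- ===== CLAIM =====
def Claim_equal_get : Prop := ∀ (points : List (Int × Int)), Dom_get points → Pre_get points → Spec_get points (get points)

-- ===== LEMMAS AND PROOFS =====


theorem beq_of_iff {b c : Bool} (h : b = true ↔ c = true) : b = c := by
  cases b <;> cases c <;> simp_all

theorem foldMinX_iff (c : Int) (l : List (Int × Int)) : ∀ a : Int,
    (c ≤ l.foldl (fun m p => if p.1 < m then p.1 else m) a) ↔ (c ≤ a ∧ ∀ p ∈ l, c ≤ p.1) := by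
  induction l with
  | nil => simp
  | cons p l ih =>
    intro a
    simp only [List.foldl_cons, ih, List.mem_cons, forall_eq_or_imp]
    split_ifs with h
    · exact ⟨fun ⟨h1, h2⟩ => ⟨by omega, by omega, h2⟩, fun ⟨h1, h2, h3⟩ => ⟨h2, h3⟩⟩
    · exact ⟨fun ⟨h1, h2⟩ => ⟨h1, by omega, h2⟩, fun ⟨h1, h2, h3⟩ => ⟨h1, h3⟩⟩

theorem foldMaxX_iff (c : Int) (l : List (Int × Int)) : ∀ a : Int,
    (l.foldl (fun m p => if p.1 > m then p.1 else m) a ≤ c) ↔ (a ≤ c ∧ ∀ p ∈ l, p.1 ≤ c) := by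
  induction l with
  | nil => simp
  | cons p l ih =>
    intro a
    simp only [List.foldl_cons, ih, List.mem_cons, forall_eq_or_imp]
    split_ifs with h
    · exact ⟨fun ⟨h1, h2⟩ => ⟨by omega, by omega, h2⟩, fun ⟨h1, h2, h3⟩ => ⟨h2, h3⟩⟩
    · exact ⟨fun ⟨h1, h2⟩ => ⟨h1, by omega, h2⟩, fun ⟨h1, h2, h3⟩ => ⟨h1, h3⟩⟩

theorem foldMinY_iff (c : Int) (l : List (Int × Int)) : ∀ a : Int,
    (c ≤ l.foldl (fun m p => if p.2 < m then p.2 else m) a) ↔ (c ≤ a ∧ ∀ p ∈ l, c ≤ p.2) := by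
  induction l with
  | nil => simp
  | cons p l ih =>
    intro a
    simp only [List.foldl_cons, ih, List.mem_cons, forall_eq_or_imp]
    split_ifs with h
    · exact ⟨fun ⟨h1, h2⟩ => ⟨by omega, by omega, h2⟩, fun ⟨h1, h2, h3⟩ => ⟨h2, h3⟩⟩
    · exact ⟨fun ⟨h1, h2⟩ => ⟨h1, by omega, h2⟩, fun ⟨h1, h2, h3⟩ => ⟨h1, h3⟩⟩

theorem foldMaxY_iff (c : Int) (l : List (Int × Int)) : ∀ a : Int,
    (l.foldl (fun m p => if p.2 > m then p.2 else m) a ≤ c) ↔ (a ≤ c ∧ ∀ p ∈ l, p.2 ≤ c) := by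
  induction l with
  | nil => simp
  | cons p l ih =>
    intro a
    simp only [List.foldl_cons, ih, List.mem_cons, forall_eq_or_imp]
    split_ifs with h
    · exact ⟨fun ⟨h1, h2⟩ => ⟨by omega, by omega, h2⟩, fun ⟨h1, h2, h3⟩ => ⟨h2, h3⟩⟩
    · exact ⟨fun ⟨h1, h2⟩ => ⟨h1, by omega, h2⟩, fun ⟨h1, h2, h3⟩ => ⟨h1, h3⟩⟩

theorem fold4 (l : List (Int × Int)) : ∀ a b c d : Int,
    l.foldl (fun (acc : Int × Int × Int × Int) (p : Int × Int) =>
        ( if p.1 < acc.1 then p.1 else acc.1,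
          if p.1 > acc.2.1 then p.1 else acc.2.1,
          if p.2 < acc.2.2.1 then p.2 else acc.2.2.1,
          if p.2 > acc.2.2.2 then p.2 else acc.2.2.2 )) (a, b, c, d)
    = (l.foldl (fun m p => if p.1 < m then p.1 else m) a,
       l.foldl (fun m p => if p.1 > m then p.1 else m) b,
       l.foldl (fun m p => if p.2 < m then p.2 else m) c,
       l.foldl (fun m p => if p.2 > m then p.2 else m) d) := by
  induction l with
  | nil => simp
  | cons p l ih => intro a b c d; simp only [List.foldl_cons]; exact ih _ _ _ _

theorem pairGet_zero (p : Int × Int) : pairGet p 0 = p.1 := rfl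
theorem pairGet_one (p : Int × Int) : pairGet p 1 = p.2 := rfl

theorem stableX_eq_inxy (sx sy : Int) (rest : List (Int × Int)) :
    (decide (((sx, sy) :: rest).foldl (fun m p => if p.1 > m then p.1 else m) sx - sx ≤ 50) &&
     decide (sx - ((sx, sy) :: rest).foldl (fun m p => if p.1 < m then p.1 else m) sx ≤ 50))
    = inxy ((sx, sy) :: rest) 50 0 := by
  apply beq_of_iff
  simp only [inxy, PySem.List.pyGet?_zero_cons, pairGet_zero, List.all_eq_true,
    Bool.and_eq_true, decide_eq_true_iff, Bool.not_eq_true', Bool.or_eq_false_iff,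
    decide_eq_false_iff_not, not_lt]
  have hmax := foldMaxX_iff (sx + 50) ((sx, sy) :: rest) sx
  have hmin := foldMinX_iff (sx - 50) ((sx, sy) :: rest) sx
  constructor
  · rintro ⟨h1, h2⟩ p hp
    have hp1 := (hmax.mp (by omega)).2 p hp
    have hp2 := (hmin.mp (by omega)).2 p hp
    exact ⟨by omega, by omega⟩
  · intro h
    refine ⟨?_, ?_⟩
    · have := hmax.mpr ⟨by omega, fun p hp => by have := h p hp; omega⟩; omega
    · have := hmin.mpr ⟨by omega, fun p hp => by have := h p hp; omega⟩; omega

theorem stableY_eq_inxy (sx sy : Int) (rest : List (Int × Int)) :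
    (decide (((sx, sy) :: rest).foldl (fun m p => if p.2 > m then p.2 else m) sy - sy ≤ 50) &&
     decide (sy - ((sx, sy) :: rest).foldl (fun m p => if p.2 < m then p.2 else m) sy ≤ 50))
    = inxy ((sx, sy) :: rest) 50 1 := by
  apply beq_of_iff
  simp only [inxy, PySem.List.pyGet?_zero_cons, pairGet_one, List.all_eq_true,
    Bool.and_eq_true, decide_eq_true_iff, Bool.not_eq_true', Bool.or_eq_false_iff,
    decide_eq_false_iff_not, not_lt]
  have hmax := foldMaxY_iff (sy + 50) ((sx, sy) :: rest) sy
  have hmin := foldMinY_iff (sy - 50) ((sx, sy) :: rest) sy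
  constructor
  · rintro ⟨h1, h2⟩ p hp
    have hp1 := (hmax.mp (by omega)).2 p hp
    have hp2 := (hmin.mp (by omega)).2 p hp
    exact ⟨by omega, by omega⟩
  · intro h
    refine ⟨?_, ?_⟩
    · have := hmax.mpr ⟨by omega, fun p hp => by have := h p hp; omega⟩; omega
    · have := hmin.mpr ⟨by omega, fun p hp => by have := h p hp; omega⟩; omega

-- ===== VERDICT (by name: the statement is the Claim_ definition above) =====
theorem get_spec : Claim_equal_get := by
  intro points _ hpre
  match points, hpre with
  | (sx, sy) :: rest, _ =>
    unfold Spec_get _root_.get get_alt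
    have hsome : (((sx, sy) :: rest).getLast?).isSome := by
      rw [List.getLast?_isSome]; simp
    obtain ⟨⟨ex, ey⟩, he⟩ := Option.isSome_iff_exists.mp hsome
    rw [PySem.List.pyGet?_zero_cons, PySem.List.pyGet?_neg_one, he]
    dsimp only
    rw [fold4, ← stableX_eq_inxy sx sy rest, ← stableY_eq_inxy sx sy rest]
    simp only [List.foldl_cons, List.foldl_nil, List.nil_append]
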